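-- pv_equiv track=rewrite | github.com/KurugoduAkhila/Training | DAY8.py | solve
-- ===== SOURCE A (Python) =====
-- def solve(a,b,c,d):
--     if a==c:
--         return a
--     elif a>c:
--         a,c=c,a
--         b,d=d,b
--     ans=c-a
--     pos=0
--     for pos in range(b):
--         if (ans%b +pos*d)%b==0:
--             break
--     if pos!=b:
--         return c+pos*d
--     return -1
-- ===== SOURCE B (Python) =====
-- def _egcd(x, y):
--     # iterative extended Euclid: returns (g, s) with g = gcd(x, y) and
--     # s*x == g (mod y), for x, y >= 0
--     old_r, r = x, y
--     old_s, s = 1, 0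
--     while r != 0:
--         q = old_r // r
--         old_r, r = r, old_r - q * r
--         old_s, s = s, old_s - q * s
--     return old_r, old_s
--
--
-- def solve(a, b, c, d):
--     # smallest pos in range(b) with (c-a + pos*d) % b == 0, via extended
--     # Euclid on the linear congruence pos*d === a-c (mod b) instead of a scan
--     if a == c:
--         return a
--     if a > c:
--         a, c = c, a
--         b, d = d, b
--     if b <= 0:
--         return -1
--     ans = c - a
--     x = d % b
--     g, s = _egcd(x, b)
--     if ans % g != 0:
--         return -1
--     m = b // g
--     pos = (s * (-ans // g)) % m
--     return c + pos * d
-- ===== Notes on version B (the rewrite author's own statement) =====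
-- stated objective: alternative
-- what changed: A scans pos = 0..b-1 testing (ans%b + pos*d)%b == 0; B solves the linear congruence pos*d ≡ a-c (mod b) directly with an iterative extended Euclid and returns the minimal solution (s*(-ans//g)) % (b//g) in closed form.
-- intended difference: When a != c, the effective modulus b' (d after the swap when a > c) is positive and gcd(d',b') does not divide c'-a', A's loop falls through with pos = b'-1 and returns c'+(b'-1)*d' instead of the -1 its own pos != b check intends; B returns -1, the intended no-solution answer. — e.g. on solve(0, 2, 1, 2): A returns 3, B returns -1
-- outside the precondition, e.g. on solve(0, -5, 3, 2): A returns 3, B returns -1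
import Mathlib
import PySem

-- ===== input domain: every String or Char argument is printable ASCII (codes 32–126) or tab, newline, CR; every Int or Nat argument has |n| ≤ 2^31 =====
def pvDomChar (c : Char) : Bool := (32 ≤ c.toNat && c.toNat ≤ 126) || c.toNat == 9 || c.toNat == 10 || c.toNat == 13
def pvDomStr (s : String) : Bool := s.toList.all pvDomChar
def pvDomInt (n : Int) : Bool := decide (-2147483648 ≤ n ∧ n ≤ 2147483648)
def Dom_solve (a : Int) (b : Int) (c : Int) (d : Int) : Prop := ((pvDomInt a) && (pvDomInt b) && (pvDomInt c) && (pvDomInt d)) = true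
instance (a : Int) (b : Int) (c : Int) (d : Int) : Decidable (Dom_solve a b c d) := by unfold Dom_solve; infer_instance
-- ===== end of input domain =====

-- B replaces A's linear scan for the smallest pos with pos*d ≡ a-c (mod b) by an
-- extended-Euclid closed-form solution of the linear congruence; the return values are
-- proved equal outside D_solve (A's fall-through quirk when the congruence has no solution).

-- ===== PORT A =====
def solveCond (ans b d q : Int) : Bool := PySem.Int.mod (PySem.Int.mod ans b + q * d) b == 0

-- the 'for pos in range(b): if …: break' loop; second argument is the current value of pos
def solveLoop (ans b d : Int) : List Int → Int → Int
  | [], pos => pos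
  | q :: rest, _ => if solveCond ans b d q then q else solveLoop ans b d rest q

-- body of A after the (possible) swap of (a,c) and (b,d)
def solveCore (a : Int) (c : Int) (b : Int) (d : Int) : Int :=
  let ans := c - a
  let pos := solveLoop ans b d (PySem.List.pyRange 0 b 1) 0
  if pos ≠ b then c + pos * d else -1

def solve (a : Int) (b : Int) (c : Int) (d : Int) : Int :=
  if a = c then a
  else if a > c then solveCore c a d b
  else solveCore a c b d

-- ===== PORT B =====
-- iterative extended Euclid of Source B: returns (old_r, old_s) = (gcd, Bézout coefficient)
def egcdLoop : Nat → Int → Int → Int → Int → Int × Int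
  | 0, old_r, _, old_s, _ => (old_r, old_s)   -- fuel guard only; never reached with the fuel used
  | fuel + 1, old_r, r, old_s, s =>
    if r = 0 then (old_r, old_s)
    else
      let q := PySem.Int.floordiv old_r r
      egcdLoop fuel r (old_r - q * r) s (old_s - q * s)

-- body of B after the (possible) swap
def solveAltCore (a : Int) (c : Int) (b : Int) (d : Int) : Int :=
  if b ≤ 0 then -1
  else
    let ans := c - a
    let x := PySem.Int.mod d b
    let gs := egcdLoop (b.natAbs + 1) x b 1 0
    if PySem.Int.mod ans gs.1 ≠ 0 then -1
    else
      let m := PySem.Int.floordiv b gs.1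
      let pos := PySem.Int.mod (gs.2 * PySem.Int.floordiv (-ans) gs.1) m
      c + pos * d

def solve_alt (a : Int) (b : Int) (c : Int) (d : Int) : Int :=
  if a = c then a
  else if a > c then solveAltCore c a d b
  else solveAltCore a c b d

-- ===== PRECONDITION & SPEC =====
-- Pre_ excludes a ≠ c with a NEGATIVE effective modulus (d after the swap when a > c, else b):
-- a negative modulus is a corner no caller of this congruence solver would specify, and A's value
-- there (the base c, from the loop over the empty range(b)) and B's (-1, no solution) are both
-- defensible; Pre_ keeps the zero modulus, where both return -1.
def Pre_solve (a : Int) (b : Int) (c : Int) (d : Int) : Prop :=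
  a = c ∨ 0 ≤ (if a > c then d else b)
instance (a : Int) (b : Int) (c : Int) (d : Int) : Decidable (Pre_solve a b c d) := by
  unfold Pre_solve; infer_instance

def pvWitness_solve : Int × Int × Int × Int := (0, 5, 3, 2)

-- On inputs where a ≠ c, the effective modulus b' > 0 and the congruence pos*d' ≡ a'-c' (mod b')
-- has no solution (gcd(d',b') does not divide c'-a'), A falls through its loop with pos = b'-1 and
-- returns c' + (b'-1)*d' instead of its own intended no-solution answer -1, which B returns.
def D_solve (a : Int) (b : Int) (c : Int) (d : Int) : Prop :=
  a ≠ c ∧ 0 < (if a > c then d else b) ∧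
    ¬ ((Int.gcd (if a > c then b else d) (if a > c then d else b) : Int) ∣
        (if a > c then a - c else c - a))
instance (a : Int) (b : Int) (c : Int) (d : Int) : Decidable (D_solve a b c d) := by
  unfold D_solve; infer_instance

def Spec_solve (a : Int) (b : Int) (c : Int) (d : Int) (out : Int) : Prop :=
  ¬ D_solve a b c d → out = solve_alt a b c d
instance (a : Int) (b : Int) (c : Int) (d : Int) (out : Int) : Decidable (Spec_solve a b c d out) := by
  unfold Spec_solve; infer_instance

def pvDiffWitness_solve : Int × Int × Int × Int := (0, 2, 1, 2)
def pvDiffWitnessOut_solve : Int × Int := (3, -1)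

-- ===== CLAIM (what is proved, stated in full; the proofs are below) =====
def Claim_unchanged_solve : Prop := ∀ (a : Int) (b : Int) (c : Int) (d : Int), Dom_solve a b c d → Pre_solve a b c d → Spec_solve a b c d (solve a b c d)
def Claim_changed_solve : Prop := Dom_solve (pvDiffWitness_solve.1) (pvDiffWitness_solve.2.1) (pvDiffWitness_solve.2.2.1) (pvDiffWitness_solve.2.2.2) ∧ Pre_solve (pvDiffWitness_solve.1) (pvDiffWitness_solve.2.1) (pvDiffWitness_solve.2.2.1) (pvDiffWitness_solve.2.2.2) ∧ D_solve (pvDiffWitness_solve.1) (pvDiffWitness_solve.2.1) (pvDiffWitness_solve.2.2.1) (pvDiffWitness_solve.2.2.2) ∧ solve (pvDiffWitness_solve.1) (pvDiffWitness_solve.2.1) (pvDiffWitness_solve.2.2.1) (pvDiffWitness_solve.2.2.2) = pvDiffWitnessOut_solve.1 ∧ solve_alt (pvDiffWitness_solve.1) (pvDiffWitness_solve.2.1) (pvDiffWitness_solve.2.2.1) (pvDiffWitness_solve.2.2.2) = pvDiffWitnessOut_solve.2 ∧ pvDiffWitnessOut_solve.1 ≠ pvDiffWitnessOut_solve.2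

-- ===== LEMMAS AND PROOFS =====

-- extended-Euclid loop: enough fuel, nonneg state ⇒ gcd and a Bézout coefficient for (x, y)
theorem egcdLoop_spec (x y : Int) : ∀ (fuel : Nat) (orr r os s : Int), 0 ≤ orr → 0 ≤ r →
    r.natAbs < fuel →
    (∃ t, os * x + t * y = orr) → (∃ t, s * x + t * y = r) →
    (egcdLoop fuel orr r os s).1 = (Int.gcd orr r : Int) ∧
      ∃ t, (egcdLoop fuel orr r os s).2 * x + t * y = (egcdLoop fuel orr r os s).1 := by
  intro fuel
  induction fuel with
  | zero => intro orr r os s _ _ hf _ _; omega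
  | succ n ih =>
    intro orr r os s hor hr hf h1 h2
    by_cases hr0 : r = 0
    · subst hr0
      simp only [egcdLoop]
      refine ⟨?_, h1⟩
      simp [Int.natAbs_of_nonneg hor]
    · have hrpos : 0 < r := lt_of_le_of_ne hr (Ne.symm hr0)
      obtain ⟨t1, h1⟩ := h1
      obtain ⟨t2, h2⟩ := h2
      simp only [egcdLoop, if_neg hr0]
      have hfd : PySem.Int.floordiv orr r = orr / r := PySem.Int.floordiv_eq_ediv_of_pos hrpos
      rw [hfd]
      have hrem : orr - orr / r * r = orr % r := by rw [Int.emod_def]; ring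
      rw [hrem]
      have hnn : 0 ≤ orr % r := Int.emod_nonneg orr (ne_of_gt hrpos)
      have hlt : orr % r < r := Int.emod_lt_of_pos orr hrpos
      have hfuel : (orr % r).natAbs < n := by omega
      obtain ⟨hg, hbez⟩ := ih r (orr % r) s (os - orr / r * s) hr hnn hfuel ⟨t2, h2⟩
        ⟨t1 - orr / r * t2, by linear_combination h1 - orr / r * h2 - Int.emod_def orr r⟩
      refine ⟨?_, hbez⟩
      rw [hg]
      congr 1
      rw [Int.gcd_comm r (orr % r), Int.gcd_emod orr r]

-- if find? hits, the break-loop returns that element whatever pos held before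
theorem solveLoop_eq_of_find? (ans b d : Int) : ∀ (l : List Int) (pos p : Int),
    l.find? (fun q => solveCond ans b d q) = some p → solveLoop ans b d l pos = p := by
  intro l
  induction l with
  | nil => intro pos p h; simp at h
  | cons q rest ih =>
    intro pos p h
    by_cases hc : solveCond ans b d q
    · rw [List.find?_cons_of_pos hc] at h
      simp only [Option.some.injEq] at h
      subst h
      simp [solveLoop, hc]
    · rw [List.find?_cons_of_neg (by simpa using hc)] at h
      simp only [solveLoop, if_neg hc]
      exact ih q p h

-- find? over range(b) returns the least satisfying element
theorem find?_pyRange_least (b p0 : Int) (f : Int → Bool) (h0 : 0 ≤ p0) (h1 : p0 < b)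
    (hp : f p0 = true) (hmin : ∀ q, 0 ≤ q → q < p0 → f q = false) :
    (PySem.List.pyRange 0 b 1).find? f = some p0 := by
  rw [PySem.List.pyRange_one_append 0 p0 b h0 (le_of_lt h1), List.find?_append]
  have hnone : (PySem.List.pyRange 0 p0 1).find? f = none := by
    rw [List.find?_eq_none]
    intro q hq
    rw [PySem.List.mem_pyRange_one] at hq
    simp [hmin q hq.1 hq.2]
  rw [hnone, PySem.List.pyRange_one_cons h1, List.find?_cons_of_pos hp]
  rfl

-- A's loop test is divisibility (b > 0)
theorem solveCond_iff (ans b d q : Int) (hb : 0 < b) :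
    solveCond ans b d q = true ↔ b ∣ (ans + q * d) := by
  unfold solveCond
  rw [beq_iff_eq, PySem.Int.mod_eq_zero_iff_dvd, PySem.Int.mod_eq_emod_of_pos hb]
  constructor
  · intro h
    have h2 : b ∣ ans - ans % b := ⟨ans / b, by rw [Int.emod_def]; ring⟩
    have h3 := dvd_add h2 h
    have he : ans - ans % b + (ans % b + q * d) = ans + q * d := by ring
    rwa [he] at h3
  · intro h
    have h2 : b ∣ ans % b - ans := ⟨-(ans / b), by rw [Int.emod_def]; ring⟩
    have h3 := dvd_add h2 h
    have he : ans % b - ans + (ans + q * d) = ans % b + q * d := by ring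
    rwa [he] at h3

theorem dvd_shift (ans b d q : Int) :
    b ∣ (ans + q * (d % b)) ↔ b ∣ (ans + q * d) := by
  constructor
  · intro h
    have h2 : b ∣ q * d - q * (d % b) := ⟨q * (d / b), by rw [Int.emod_def]; ring⟩
    have h3 := dvd_add h2 h
    have he : q * d - q * (d % b) + (ans + q * (d % b)) = ans + q * d := by ring
    rwa [he] at h3
  · intro h
    have h2 : b ∣ q * (d % b) - q * d := ⟨-(q * (d / b)), by rw [Int.emod_def]; ring⟩
    have h3 := dvd_add h2 h
    have he : q * (d % b) - q * d + (ans + q * d) = ans + q * (d % b) := by ring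
    rwa [he] at h3

-- core number theory: equality of the two post-swap bodies when a solution exists
theorem core_eq (a c b d : Int) (hb : 0 < b)
    (hdvd : (Int.gcd d b : Int) ∣ (c - a)) :
    solveCore a c b d = solveAltCore a c b d := by
  simp only [solveCore, solveAltCore]
  set ans := c - a with hansdef
  set x := PySem.Int.mod d b with hxdef
  have hxe : x = d % b := PySem.Int.mod_eq_emod_of_pos hb
  have hx0 : 0 ≤ x := by rw [hxe]; exact Int.emod_nonneg d (ne_of_gt hb)
  set gs := egcdLoop (b.natAbs + 1) x b 1 0 with hgsdef
  obtain ⟨hg, t, hbez⟩ := egcdLoop_spec x b (b.natAbs + 1) x b 1 0 hx0 (le_of_lt hb)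
    (by omega) ⟨0, by ring⟩ ⟨1, by ring⟩
  rw [hg] at hbez ⊢
  set g : Int := (Int.gcd x b : Int) with hgdef
  set s := gs.2 with hsdef
  have hgpos : 0 < g := by
    have h : 0 < Int.gcd x b := Int.gcd_pos_iff.mpr (Or.inr (ne_of_gt hb))
    rw [hgdef]
    exact_mod_cast h
  have hga : g ∣ ans := by
    rw [hgdef, hxe, Int.gcd_emod d b]; exact hdvd
  have hgb : g ∣ b := Int.gcd_dvd_right x b
  have hgx : g ∣ x := Int.gcd_dvd_left x b
  obtain ⟨m, hm⟩ := hgb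
  obtain ⟨x', hx'⟩ := hgx
  obtain ⟨a', ha'⟩ := hga
  have hmpos : 0 < m := by nlinarith
  have hmle : m ≤ b := by nlinarith
  have hbg : PySem.Int.floordiv b g = m := by
    rw [PySem.Int.floordiv_eq_ediv_of_pos hgpos, hm,
      Int.mul_ediv_cancel_left m (ne_of_gt hgpos)]
  have hng : PySem.Int.floordiv (-ans) g = -a' := by
    rw [PySem.Int.floordiv_eq_ediv_of_pos hgpos, ha',
      show -(g * a') = g * (-a') by ring, Int.mul_ediv_cancel_left _ (ne_of_gt hgpos)]
  have hred : s * x' + t * m = 1 := by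
    refine mul_left_cancel₀ (ne_of_gt hgpos) ?_
    linear_combination hbez - s * hx' - t * hm
  rw [hbg, hng, PySem.Int.mod_eq_emod_of_pos hmpos]
  set pos0 := (s * -a') % m with hp0def
  have hp0nn : 0 ≤ pos0 := Int.emod_nonneg _ (ne_of_gt hmpos)
  have hp0m : pos0 < m := Int.emod_lt_of_pos _ hmpos
  set k := -((s * -a') / m) with hkdef
  have hkeq : pos0 = -(s * a') + k * m := by
    rw [hp0def, Int.emod_def, hkdef]; ring
  have hsat : b ∣ (ans + pos0 * d) := by
    rw [← dvd_shift ans b d pos0, ← hxe]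
    refine ⟨a' * t + k * x', ?_⟩
    rw [ha', hkeq, hx', hm]
    linear_combination (-(g * a')) * hred
  have hmin : ∀ q : Int, 0 ≤ q → q < pos0 → ¬ b ∣ (ans + q * d) := by
    intro q hq0 hqp hqd
    rw [← dvd_shift ans b d q, ← hxe] at hqd
    obtain ⟨w, hw⟩ := hqd
    rw [ha', hx', hm] at hw
    have hcan : a' + q * x' = m * w := by
      refine mul_left_cancel₀ (ne_of_gt hgpos) ?_
      linear_combination hw
    have hdvd2 : m ∣ pos0 - q := ⟨k - s * w - q * t, by linear_combination hkeq - s * hcan + q * hred⟩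
    have := Int.le_of_dvd (by omega) hdvd2
    omega
  have hfind : (PySem.List.pyRange 0 b 1).find? (fun q => solveCond ans b d q) = some pos0 := by
    refine find?_pyRange_least b pos0 _ hp0nn (lt_of_lt_of_le hp0m hmle)
      ((solveCond_iff ans b d pos0 hb).mpr hsat) ?_
    intro q hq0 hq1
    rcases Bool.eq_false_or_eq_true (solveCond ans b d q) with hf | hf
    · exact absurd ((solveCond_iff ans b d q hb).mp hf) (hmin q hq0 hq1)
    · exact hf
  have hloop : solveLoop ans b d (PySem.List.pyRange 0 b 1) 0 = pos0 :=
    solveLoop_eq_of_find? ans b d _ 0 pos0 hfind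
  rw [hloop]
  have hmodg : PySem.Int.mod ans g = 0 := (PySem.Int.mod_eq_zero_iff_dvd ans g).mpr ⟨a', ha'⟩
  rw [hmodg, if_pos (by omega : pos0 ≠ b), if_neg (not_le.mpr hb), if_neg (by simp)]

theorem core_eq_zero (a c d : Int) : solveCore a c 0 d = solveAltCore a c 0 d := by
  simp [solveCore, solveAltCore, solveLoop, PySem.List.pyRange_one_eq_nil (le_refl 0)]

-- ===== VERDICT (by name: the statement is the Claim_ definition above) =====
theorem solve_spec : Claim_unchanged_solve := by
  intro a b c d _hdom hpre hnd
  show solve a b c d = solve_alt a b c d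
  by_cases hac : a = c
  · simp [solve, solve_alt, hac]
  · rcases hpre with h | h
    · exact absurd h hac
    by_cases hgt : a > c
    · rw [if_pos hgt] at h
      simp only [solve, solve_alt, if_neg hac, if_pos hgt]
      rcases lt_or_eq_of_le h with hd0 | hd0
      · refine core_eq c a d b hd0 ?_
        by_contra hcon
        exact hnd ⟨hac, by simpa [hgt] using hd0, by simpa [hgt] using hcon⟩
      · rw [← hd0]; exact core_eq_zero c a b
    · rw [if_neg hgt] at h
      simp only [solve, solve_alt, if_neg hac, if_neg hgt]
      rcases lt_or_eq_of_le h with hb0 | hb0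
      · refine core_eq a c b d hb0 ?_
        by_contra hcon
        exact hnd ⟨hac, by simpa [hgt] using hb0, by simpa [hgt] using hcon⟩
      · rw [← hb0]; exact core_eq_zero a c d

theorem solve_changed : Claim_changed_solve := by
  unfold Claim_changed_solve; decide
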